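-- pv_equiv track=rewrite | github.com/hayakawa-koichi/leetcode_python | src/solutions/easy/0070_ClimbingStairs/solution.py | __giveup
-- ===== SOURCE A (Python) =====
-- import math
--
-- def __giveup(n: int) -> int:
--     if n in (1,2):
--         return n
--     def __comb(n, r):
--         return math.factorial(n) // (math.factorial(n - r) * math.factorial(r))
--     ans = 1
--     i = 1
--
--
--     while n-i > n//2:
--         ans+=__comb(n-i,1)
--         i+=1
--     return ans
-- ===== SOURCE B (Python) =====
-- def __giveup(n: int) -> int:
--     if n in (1, 2):
--         return n
--     h = n // 2
--     m = n - 1 - h          # number of loop iterations in the naive version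
--     if m <= 0:
--         return 1
--     # 1 + sum of k for k from h+1 to n-1, by the arithmetic-series formula
--     return 1 + m * (h + 1) + m * (m - 1) // 2
-- ===== Notes on version B (the rewrite author's own statement) =====
-- stated objective: faster
-- what changed: Replaces the while loop that adds comb(n-i,1) via repeated factorials with the closed-form arithmetic-series sum of the integers from n//2+1 to n-1.
import Mathlib
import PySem

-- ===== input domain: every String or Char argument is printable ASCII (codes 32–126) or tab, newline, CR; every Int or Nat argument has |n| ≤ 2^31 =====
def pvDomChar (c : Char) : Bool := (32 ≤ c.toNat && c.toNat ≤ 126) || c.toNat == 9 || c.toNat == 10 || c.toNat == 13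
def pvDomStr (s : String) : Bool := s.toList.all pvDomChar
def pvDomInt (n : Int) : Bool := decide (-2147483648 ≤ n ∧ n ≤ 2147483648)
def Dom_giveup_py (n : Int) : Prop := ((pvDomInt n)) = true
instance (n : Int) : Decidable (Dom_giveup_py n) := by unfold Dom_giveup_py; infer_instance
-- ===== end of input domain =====

-- B replaces A's factorial-based summation loop with the closed-form arithmetic-series sum.

-- ===== PORT A =====
-- math.factorial; every argument A passes to it is ≥ 1 (the loop runs only when n ≥ 3, and
-- then n - i > n//2 ≥ 1), so toNat is exact on all reached calls.
def pyFactorial (k : Int) : Int := (Nat.factorial k.toNat : Int)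

-- __comb(n, r) = factorial(n) // (factorial(n-r) * factorial(r)); '//' is Python floor division
def combA (n r : Int) : Int :=
  PySem.Int.floordiv (pyFactorial n) (pyFactorial (n - r) * pyFactorial r)

-- the while loop: while n - i > h: ans += __comb(n-i, 1); i += 1   (h = n//2 is loop-invariant)
def giveupLoop (n h ans i : Int) : Int :=
  if n - i > h then giveupLoop n h (ans + combA (n - i) 1) (i + 1) else ans
termination_by (n - i - h).toNat
decreasing_by omega

def giveup_py (n : Int) : Int :=
  if n = 1 ∨ n = 2 then n
  else giveupLoop n (PySem.Int.floordiv n 2) 1 1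

-- ===== PORT B =====
def giveup_py_alt (n : Int) : Int :=
  if n = 1 ∨ n = 2 then n
  else
    let h := PySem.Int.floordiv n 2
    let m := n - 1 - h
    if m ≤ 0 then 1
    else 1 + m * (h + 1) + PySem.Int.floordiv (m * (m - 1)) 2

-- ===== PRECONDITION & SPEC =====
def Spec_giveup_py (n : Int) (out : Int) : Prop := out = giveup_py_alt n
instance (n : Int) (out : Int) : Decidable (Spec_giveup_py n out) := by unfold Spec_giveup_py; infer_instance

-- ===== CLAIM (what is proved, stated in full; the proofs are below) =====
def Claim_equal_giveup_py : Prop := ∀ (n : Int), Dom_giveup_py n → Spec_giveup_py n (giveup_py n)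

-- ===== LEMMAS AND PROOFS =====

-- Where the loop calls it (k ≥ 2), __comb(k, 1) is just k.
lemma combA_one (k : Int) (hk : 2 ≤ k) : combA k 1 = k := by
  unfold combA pyFactorial PySem.Int.floordiv
  have h1 : k.toNat = (k - 1).toNat + 1 := by omega
  have h2 : ((1 : Int)).toNat = 1 := rfl
  rw [h1, h2, Nat.factorial_succ, Nat.factorial_one]
  push_cast
  rw [mul_one, mul_comm, Int.mul_fdiv_cancel_left _ (by positivity)]
  omega

-- Loop value, stated doubled to avoid division.
lemma giveupLoop_eq (n h ans i : Int) (hh : 1 ≤ h) :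
    2 * giveupLoop n h ans i
      = 2 * ans + (if n - i > h then (n - i + h + 1) * (n - i - h) else 0) := by
  unfold giveupLoop
  split_ifs with hc
  · have hk : 2 ≤ n - i := by omega
    rw [giveupLoop_eq n h (ans + combA (n - i) 1) (i + 1) hh, combA_one _ hk]
    split_ifs with hc2
    · ring
    · have hm : n - i = h + 1 := by omega
      rw [hm]; ring
  · simp
termination_by (n - i - h).toNat
decreasing_by omega

lemma fdiv_two_even (x : Int) (hx : 2 ∣ x) : 2 * Int.fdiv x 2 = x := by
  obtain ⟨y, rfl⟩ := hx
  rw [Int.mul_fdiv_cancel_left _ (by norm_num)]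

-- ===== VERDICT (by name: the statement is the Claim_ definition above) =====
theorem giveup_py_spec : Claim_equal_giveup_py := by
  intro n _
  unfold Spec_giveup_py giveup_py giveup_py_alt
  split_ifs with h12
  · rfl
  · simp only [PySem.Int.floordiv]
    have hhe : Int.fdiv n 2 = n / 2 := by rw [Int.fdiv_eq_ediv]; simp
    set h := Int.fdiv n 2 with hhdef
    by_cases hm : n - 1 - h ≤ 0
    · rw [if_pos hm]
      unfold giveupLoop
      rw [if_neg (by omega)]
    · rw [if_neg hm]
      have h2 := giveupLoop_eq n h 1 1 (by omega)
      rw [if_pos (by omega : n - 1 > h)] at h2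
      have heven : 2 ∣ (n - 1 - h) * (n - 1 - h - 1) := by
        rcases Int.even_or_odd (n - 1 - h) with ⟨k, hk⟩ | ⟨k, hk⟩
        · exact ⟨k * (n - 1 - h - 1), by rw [hk]; ring⟩
        · exact ⟨(n - 1 - h) * k, by rw [hk]; ring⟩
      have h3 := fdiv_two_even _ heven
      have key : (n - 1 + h + 1) * (n - 1 - h)
          = 2 * ((n - 1 - h) * (h + 1)) + (n - 1 - h) * (n - 1 - h - 1) := by ring
      linarith
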